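-- pv_equiv track=rewrite | github.com/TomasMrkva/advent-of-code-2023 | day12/d12ptA.py | check
-- ===== SOURCE A (Python) =====
-- def check(nums: list[int], row: list[str]):
--     count = 0
--     res = []
--     for ch in row:
--         match ch, count:
--             case '.', 0: continue
--             case '.', _:
--                 if count:
--                     res += [count]
--                     count = 0
--             case '#', _: count += 1
--     if count != 0:
--         res += [count]
--     return res == nums
-- ===== SOURCE B (Python) =====
-- def check(nums, row):
--     s = ''.join(c for c in row if c in ('.', '#'))
--     return [len(seg) for seg in s.split('.') if seg] == nums
-- ===== Notes on version B (the rewrite author's own statement) =====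
-- stated objective: idiomatic
-- what changed: Replaces A's character-by-character count/reset state machine with a one-liner: keep only '.'/'#' elements (A ignores everything else), join them, split on '.', and compare the lengths of the non-empty segments to nums.
import Mathlib
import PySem

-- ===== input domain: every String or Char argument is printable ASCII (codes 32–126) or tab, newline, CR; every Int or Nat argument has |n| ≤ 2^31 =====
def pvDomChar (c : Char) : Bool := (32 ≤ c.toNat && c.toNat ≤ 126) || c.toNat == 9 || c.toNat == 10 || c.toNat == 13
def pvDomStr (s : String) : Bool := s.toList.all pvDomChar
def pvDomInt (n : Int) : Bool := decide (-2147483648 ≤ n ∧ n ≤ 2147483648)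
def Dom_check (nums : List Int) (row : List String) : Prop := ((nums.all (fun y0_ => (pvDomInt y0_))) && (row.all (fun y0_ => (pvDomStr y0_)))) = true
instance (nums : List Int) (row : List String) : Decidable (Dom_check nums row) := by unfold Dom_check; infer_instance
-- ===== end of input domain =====

-- B joins the '.'/'#' elements (A ignores all other strings) and splits on '.', replacing A's count/reset state machine; objective: idiomatic.

-- ===== PORT A =====
-- the body of A's 'for ch in row' loop, match arms in order ('.'&count==0: continue; '.': flush; '#': count += 1; default: pass)
def checkStep (st : Int × List Int) (ch : String) : Int × List Int :=
  if ch == "." && st.1 == 0 then st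
  else if ch == "." then (if st.1 ≠ 0 then (0, st.2 ++ [st.1]) else st)
  else if ch == "#" then (st.1 + 1, st.2)
  else st

-- A's trailing 'if count != 0: res += [count]'
def checkRes (st : Int × List Int) : List Int :=
  if st.1 ≠ 0 then st.2 ++ [st.1] else st.2

def check (nums : List Int) (row : List String) : Bool :=
  checkRes (row.foldl checkStep (0, [])) == nums

-- ===== PORT B =====
-- ''.join(c for c in row if c in ('.', '#')), then s.split('.') (sep "." is non-empty so
-- split? is always 'some'; getD [] totalises), keep non-empty segments, compare lengths.
def check_alt (nums : List Int) (row : List String) : Bool :=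
  ((((PySem.Str.split?
        (PySem.Str.join "" (row.filter (fun c => c == "." || c == "#")))
        ".").getD []).filter (fun seg => !(seg == ""))).map PySem.Str.len) == nums

-- ===== PRECONDITION & SPEC =====
def Spec_check (nums : List Int) (row : List String) (out : Bool) : Prop := out = check_alt nums row
instance (nums : List Int) (row : List String) (out : Bool) : Decidable (Spec_check nums row out) := by unfold Spec_check; infer_instance

-- ===== CLAIM (what is proved, stated in full; the proofs are below) =====
def Claim_equal_check : Prop := ∀ (nums : List Int) (row : List String), Dom_check nums row → Spec_check nums row (check nums row)

-- ===== LEMMAS AND PROOFS =====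

/-- Simple recursive model of s.split('.') on a char list: `pvSplit pre l` splits `l`
on '.', with `pre` the piece accumulated so far. -/
def pvSplit (pre : List Char) : List Char → List (List Char)
  | [] => [pre]
  | c :: t => if c = '.' then pre :: pvSplit [] t else pvSplit (pre ++ [c]) t

theorem pvSplit_go :
    ∀ (fuel : Nat) (l cur : List Char) (acc : List (List Char)), l.length < fuel →
      PySem.Chars.splitOn.go ['.'] fuel l cur acc = acc.reverse ++ pvSplit cur.reverse l := by
  intro fuel
  induction fuel with
  | zero => intro l cur acc h; omega
  | succ n ih =>
    intro l cur acc h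
    match l with
    | [] => simp [PySem.Chars.splitOn.go, pvSplit]
    | c :: t =>
      by_cases hc : c = '.'
      · subst hc
        have hpre : List.isPrefixOf ['.'] ('.' :: t) = true := by
          simp [List.isPrefixOf]
        simp only [PySem.Chars.splitOn.go, hpre, if_pos]
        rw [show List.drop (['.'] : List Char).length ('.' :: t) = t from rfl]
        rw [ih t [] (List.reverse cur :: acc) (by simpa using Nat.lt_of_succ_lt_succ h)]
        simp [pvSplit]
      · have hpre : List.isPrefixOf ['.'] (c :: t) = false := by
          simp [List.isPrefixOf]; exact fun h => hc h.symm
        simp only [PySem.Chars.splitOn.go, hpre, Bool.false_eq_true, if_false]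
        rw [ih t (c :: cur) acc (by simpa using Nat.lt_of_succ_lt_succ h)]
        simp [pvSplit, hc]

theorem splitOn_eq_pvSplit (l : List Char) :
    PySem.Chars.splitOn l ['.'] = pvSplit [] l := by
  unfold PySem.Chars.splitOn
  rw [pvSplit_go (l.length + 1) l [] [] (by omega)]
  simp

/-- A's fold ignores every element other than "." and "#". -/
theorem foldl_checkStep_filter (row : List String) : ∀ st : Int × List Int,
    row.foldl checkStep st = (row.filter (fun c => c == "." || c == "#")).foldl checkStep st := by
  induction row with
  | nil => intro st; rfl
  | cons ch t ih =>
    intro st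
    by_cases h1 : ch = "."
    · subst h1; simp [List.foldl, ih]
    · by_cases h2 : ch = "#"
      · subst h2; simp [List.foldl, ih]
      · have : checkStep st ch = st := by
          simp [checkStep, h1, h2]
        simp [List.foldl, this, ih, h1, h2]

/-- Main invariant: over a row of "."/"#" strings, A's state machine (current run length
`c`, output so far `res`, plus the final flush) produces `res` followed by the lengths of
the non-empty pvSplit segments of the corresponding char list, the current segment being
`c` copies of '#'. -/
theorem main_inv (row : List String) (h : ∀ s ∈ row, s = "." ∨ s = "#") :
    ∀ (c : Nat) (res : List Int),
      checkRes (row.foldl checkStep ((c : Int), res)) =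
      res ++ ((pvSplit (List.replicate c '#') (row.flatMap String.toList)).filter
                (fun g => g ≠ [])).map (fun g => (g.length : Int)) := by
  induction row with
  | nil =>
    intro c res
    by_cases hc : c = 0
    · subst hc; simp [pvSplit, checkRes]
    · have hci : ((c : Int) ≠ 0) := by exact_mod_cast hc
      simp [pvSplit, checkRes, hc]
  | cons ch t ih =>
    have ht : ∀ s ∈ t, s = "." ∨ s = "#" := fun s hs => h s (List.mem_cons_of_mem _ hs)
    intro c res
    rcases h ch (List.mem_cons_self) with hch | hch
    · subst hch
      by_cases hc : c = 0
      · subst hc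
        have hstep : checkStep (((0 : Nat) : Int), res) "." = (((0 : Nat) : Int), res) := by
          simp [checkStep]
        rw [List.foldl_cons, hstep, ih ht 0 res]
        simp [pvSplit]
      · have hci : ((c : Int) ≠ 0) := by exact_mod_cast hc
        have hstep : checkStep ((c : Int), res) "." = (((0 : Nat) : Int), res ++ [(c : Int)]) := by
          simp [checkStep, hc]
        rw [List.foldl_cons, hstep, ih ht 0 (res ++ [(c : Int)])]
        have hrep : (List.replicate c '#') ≠ ([] : List Char) := by
          simp [List.replicate_eq_nil_iff, hc]
        simp [pvSplit, hrep]
    · subst hch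
      have hstep : checkStep ((c : Int), res) "#" = (((c + 1 : Nat) : Int), res) := by
        simp [checkStep]
      rw [List.foldl_cons, hstep, ih ht (c + 1) res]
      have hrep : List.replicate c '#' ++ ['#'] = List.replicate (c + 1) '#' := by
        simp [List.replicate_succ']
      simp [pvSplit, hrep]

/-- join with the empty separator is concatenation. -/
theorem join_nil_eq_flatten : ∀ parts : List (List Char),
    PySem.Chars.join [] parts = parts.flatten
  | [] => by simp [PySem.Chars.join_nil]
  | [a] => by simp [PySem.Chars.join_singleton]
  | a :: b :: t => by
      rw [PySem.Chars.join_cons_cons, join_nil_eq_flatten (b :: t)]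
      simp

/-- The char list of B's joined string is the concatenation of the filtered row. -/
theorem joined_toList (row : List String) :
    (PySem.Str.join "" (row.filter (fun c => c == "." || c == "#"))).toList =
      (row.filter (fun c => c == "." || c == "#")).flatMap String.toList := by
  rw [PySem.Str.toList_join]
  rw [show ("" : String).toList = ([] : List Char) from rfl]
  rw [join_nil_eq_flatten]
  simp [List.flatMap_def]

/-- Every element of A's filtered row is "." or "#". -/
theorem filter_mem (row : List String) :
    ∀ s ∈ row.filter (fun c => c == "." || c == "#"), s = "." ∨ s = "#" := by
  intro s hs
  have := List.of_mem_filter hs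
  simp at this; exact this

theorem check_alt_eq (nums : List Int) (row : List String) :
    check_alt nums row =
      ((((pvSplit [] ((row.filter (fun c => c == "." || c == "#")).flatMap String.toList)).filter
          (fun g => g ≠ [])).map (fun g => (g.length : Int))) == nums) := by
  unfold check_alt
  have hsplit : PySem.Str.split?
      (PySem.Str.join "" (row.filter (fun c => c == "." || c == "#"))) "." =
      some ((PySem.Chars.splitOn
        ((row.filter (fun c => c == "." || c == "#")).flatMap String.toList) ['.']).map
          String.ofList) := by
    have h := PySem.Str.split?_map
      (PySem.Str.join "" (row.filter (fun c => c == "." || c == "#"))) "."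
    rw [joined_toList] at h
    have hc : PySem.Chars.split?
        ((row.filter (fun c => c == "." || c == "#")).flatMap String.toList)
        (".".toList) =
        some (PySem.Chars.splitOn
          ((row.filter (fun c => c == "." || c == "#")).flatMap String.toList) ['.']) := by
      simp [PySem.Chars.split?]
    rw [hc] at h
    cases hx : PySem.Str.split?
        (PySem.Str.join "" (row.filter (fun c => c == "." || c == "#"))) "." with
    | none => rw [hx] at h; simp at h
    | some segs =>
      rw [hx] at h
      simp only [Option.map_some, Option.some.injEq] at h
      congr 1
      have h2 : segs.map (String.ofList ∘ String.toList) = segs.map id := by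
        apply List.map_congr_left
        intro s _
        simp [Function.comp]
      rw [← h, List.map_map]
      rw [h2, List.map_id]
  rw [hsplit]
  simp only [Option.getD_some]
  rw [splitOn_eq_pvSplit]
  congr 1
  rw [List.filter_map, List.map_map]
  have hp : ((fun seg => !(seg == "")) ∘ String.ofList) = (fun g : List Char => decide (g ≠ [])) := by
    funext g
    cases g with
    | nil => simp [Function.comp]
    | cons c t =>
      simp only [Function.comp]
      have : String.ofList (c :: t) ≠ "" := by
        intro he
        have := congrArg String.toList he
        simp at this
      simp [this]
  rw [hp]
  congr 1
  funext g
  simp [Function.comp, PySem.Str.len]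

-- ===== VERDICT (by name: the statement is the Claim_ definition above) =====
theorem check_spec : Claim_equal_check := by
  intro nums row _
  unfold Spec_check
  rw [check_alt_eq]
  unfold check
  rw [foldl_checkStep_filter]
  have h := main_inv (row.filter (fun c => c == "." || c == "#")) (filter_mem row) 0 []
  simp only [Nat.cast_zero, List.replicate_zero, List.nil_append] at h
  rw [h]
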